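-- pv_equiv track=rewrite | github.com/jhacksman/librarian | ingest/src/ingest/agents/technical_concepts.py | _deduplicate_concepts
-- ===== SOURCE A (Python) =====
-- def _deduplicate_concepts(concepts: list[dict]) -> list[dict]:
--     """Remove duplicate concepts, keeping the most detailed version.
--
--     Args:
--         concepts: List of concept dictionaries
--
--     Returns:
--         Deduplicated list
--     """
--     seen = {}
--     for concept in concepts:
--         term_lower = concept.get("term", "").lower().strip()
--         if not term_lower:
--             continue
--
--         if term_lower not in seen:
--             seen[term_lower] = concept
--         else:
--             existing = seen[term_lower]
--             if len(concept.get("definition", "")) > len(existing.get("definition", "")):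
--                 seen[term_lower] = concept
--
--     return list(seen.values())[:30]
-- ===== SOURCE B (Python) =====
-- def _deduplicate_concepts(concepts: list[dict]) -> list[dict]:
--     """Two-pass: group concepts by normalized term, then pick each group's
--     first longest-definition concept; keep first 30 groups."""
--     groups = {}
--     for concept in concepts:
--         key = concept.get("term", "").lower().strip()
--         if key:
--             groups.setdefault(key, []).append(concept)
--     winners = [max(group, key=lambda c: len(c.get("definition", "")))
--                for group in groups.values()]
--     return winners[:30]
-- ===== Notes on version B (the rewrite author's own statement) =====
-- stated objective: alternative
-- what changed: Replaces A's streaming best-so-far dict with a two-pass scheme: first group all concepts by the normalized term, then reduce each group with max(key=definition length), which keeps the first maximum just as A's strict-greater replacement does.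
import Mathlib
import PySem

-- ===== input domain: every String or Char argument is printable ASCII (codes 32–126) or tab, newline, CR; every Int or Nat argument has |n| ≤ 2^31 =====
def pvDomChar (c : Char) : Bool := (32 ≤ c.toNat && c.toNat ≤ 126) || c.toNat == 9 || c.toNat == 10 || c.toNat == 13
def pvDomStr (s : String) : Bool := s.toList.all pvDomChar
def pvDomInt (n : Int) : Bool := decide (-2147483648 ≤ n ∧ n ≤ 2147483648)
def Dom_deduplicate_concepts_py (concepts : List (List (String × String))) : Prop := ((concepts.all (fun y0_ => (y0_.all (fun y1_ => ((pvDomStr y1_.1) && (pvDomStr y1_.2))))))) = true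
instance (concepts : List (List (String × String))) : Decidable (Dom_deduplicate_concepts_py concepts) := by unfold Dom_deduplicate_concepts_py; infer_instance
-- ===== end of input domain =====

-- B replaces A's streaming best-so-far dict with a two-pass group-then-reduce
-- decomposition (group by normalized term, then pick each group's first
-- longest-definition concept); same cost, different structure.


-- ===== PORT A =====
-- concept.get("term", "").lower().strip()  (the same expression appears in both Pythons)
def pvKey (c : List (String × String)) : String :=
  PySem.Str.strip (PySem.Str.lower ((PySem.Dict.mk c).getD "term" ""))

-- len(concept.get("definition", ""))  (the same expression appears in both Pythons)
def pvDefLen (c : List (String × String)) : Int :=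
  PySem.Str.len ((PySem.Dict.mk c).getD "definition" "")

-- seen[term_lower] is read only when the key is present, so getD's default is never used
def deduplicate_concepts_py (concepts : List (List (String × String))) : List (List (String × String)) :=
  let seen : PySem.Dict String (List (String × String)) :=
    concepts.foldl (fun seen concept =>
      let term_lower := pvKey concept
      if term_lower = "" then seen
      else if seen.contains term_lower = false then seen.insert term_lower concept
      else
        let existing := seen.getD term_lower []
        if pvDefLen existing < pvDefLen concept then seen.insert term_lower concept
        else seen)
      PySem.Dict.empty
  (PySem.Dict.values seen).take 30


-- ===== PORT B =====
-- max(group, key=…) is applied only to nonempty stored groups, so getD's default is never used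
def deduplicate_concepts_py_alt (concepts : List (List (String × String))) : List (List (String × String)) :=
  let groups : PySem.Dict String (List (List (String × String))) :=
    concepts.foldl (fun d concept =>
      let key := pvKey concept
      if key = "" then d
      else d.modify key [] (fun g => g ++ [concept]))
      PySem.Dict.empty
  let winners := (PySem.Dict.values groups).map (fun group => (PySem.List.max? group pvDefLen).getD [])
  winners.take 30


-- ===== PRECONDITION & SPEC =====
def Spec_deduplicate_concepts_py (concepts : List (List (String × String))) (out : List (List (String × String))) : Prop := out = deduplicate_concepts_py_alt concepts
instance (concepts : List (List (String × String))) (out : List (List (String × String))) : Decidable (Spec_deduplicate_concepts_py concepts out) := by unfold Spec_deduplicate_concepts_py; infer_instance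

-- ===== CLAIM (what is proved, stated in full; the proofs are below) =====
def Claim_equal_deduplicate_concepts_py : Prop := ∀ (concepts : List (List (String × String))), Dom_deduplicate_concepts_py concepts → Spec_deduplicate_concepts_py concepts (deduplicate_concepts_py concepts)

-- ===== LEMMAS AND PROOFS =====
def pvBest (g : List (List (String × String))) : List (String × String) :=
  (PySem.List.max? g pvDefLen).getD []

def pvStepA (seen : PySem.Dict String (List (String × String))) (concept : List (String × String)) :
    PySem.Dict String (List (String × String)) :=
  if pvKey concept = "" then seen
  else if seen.contains (pvKey concept) = false then seen.insert (pvKey concept) concept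
  else if pvDefLen (seen.getD (pvKey concept) []) < pvDefLen concept then seen.insert (pvKey concept) concept
  else seen

def pvStepB (d : PySem.Dict String (List (List (String × String)))) (concept : List (String × String)) :
    PySem.Dict String (List (List (String × String))) :=
  if pvKey concept = "" then d
  else d.modify (pvKey concept) [] (fun g => g ++ [concept])

lemma pvMax?_append_one (g : List (List (String × String))) (c : List (String × String)) :
    PySem.List.max? (g ++ [c]) pvDefLen =
      match PySem.List.max? g pvDefLen with
      | none => some c
      | some m => if pvDefLen m < pvDefLen c then some c else some m := by
  rcases hg : PySem.List.max? g pvDefLen with _ | m <;>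
    · simp only [PySem.List.max?] at hg ⊢
      rw [List.foldl_append, hg]
      simp

lemma pvBest_append_singleton (g : List (List (String × String))) (c : List (String × String)) :
    pvBest (g ++ [c]) = if pvDefLen (pvBest g) < pvDefLen c ∨ g = [] then c else pvBest g := by
  rcases hg : PySem.List.max? g pvDefLen with _ | m
  · have hgn : g = [] := (PySem.List.max?_eq_none_iff _ _).1 hg
    subst hgn
    simp [pvBest, PySem.List.max?]
  · have hne : g ≠ [] := by
      intro h; subst h; simp [PySem.List.max?] at hg
    simp only [pvBest, pvMax?_append_one, hg, hne, or_false, Option.getD_some]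
    by_cases h : pvDefLen m < pvDefLen c <;> simp [h]

def pvRel (seen : PySem.Dict String (List (String × String)))
    (grpd : PySem.Dict String (List (List (String × String)))) : Prop :=
  seen.items = grpd.items.map (fun p => (p.1, pvBest p.2)) ∧
  grpd.keys.Nodup ∧ (∀ p ∈ grpd.items, p.2 ≠ [])

lemma pvRel_contains {seen grpd} (h : pvRel seen grpd) (k : String) :
    seen.contains k = grpd.contains k := by
  simp [PySem.Dict.contains, h.1, List.any_map, Function.comp_def]

lemma pvRel_get? {seen grpd} (h : pvRel seen grpd) (k : String) :
    seen.get? k = (grpd.get? k).map pvBest := by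
  simp only [PySem.Dict.get?, h.1]
  induction grpd.items with
  | nil => simp
  | cons p t ih =>
    simp only [List.map_cons, List.find?_cons]
    by_cases hk : (p.1 == k) = true
    · simp [hk]
    · simp [Function.comp_def, hk]

lemma pvRel_step {seen grpd} (h : pvRel seen grpd) (c : List (String × String)) :
    pvRel (pvStepA seen c) (pvStepB grpd c) := by
  obtain ⟨hitems, hnd, hne⟩ := h
  by_cases hk : pvKey c = ""
  · unfold pvStepA pvStepB
    rw [if_pos hk, if_pos hk]
    exact ⟨hitems, hnd, hne⟩
  · by_cases hc : grpd.contains (pvKey c) = true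
    · -- key already present: A may replace, B appends to the group
      have hcs : seen.contains (pvKey c) = true := by
        rw [pvRel_contains ⟨hitems, hnd, hne⟩]; exact hc
      obtain ⟨g, hg⟩ : ∃ g, grpd.get? (pvKey c) = some g := by
        rcases hgo : grpd.get? (pvKey c) with _ | g
        · exact absurd ((PySem.Dict.get?_eq_none_iff_contains _ _).1 hgo) (by simp [hc])
        · exact ⟨g, rfl⟩
      have hgne : g ≠ [] := hne _ (PySem.Dict.mem_items_of_get?_eq_some grpd hg)
      have hex : seen.getD (pvKey c) [] = pvBest g := by
        simp [PySem.Dict.getD_eq_get?_getD, pvRel_get? ⟨hitems, hnd, hne⟩, hg]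
      have hmod : pvStepB grpd c = grpd.insert (pvKey c) (g ++ [c]) := by
        unfold pvStepB
        rw [if_neg hk]
        simp [PySem.Dict.modify, PySem.Dict.getD_eq_get?_getD, hg]
      have hval : ∀ p ∈ grpd.items, p.1 = pvKey c → p.2 = g := by
        intro p hp hpk
        have h2 := PySem.Dict.get?_of_mem_items grpd (k := p.1) (v := p.2) hp hnd
        rw [hpk, hg] at h2
        exact (Option.some_injective _ h2.symm)
      have hkeys : (pvStepB grpd c).keys = grpd.keys := by
        rw [hmod]; exact PySem.Dict.keys_insert_of_contains grpd _ hc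
      have hne' : ∀ p ∈ (pvStepB grpd c).items, p.2 ≠ [] := by
        rw [hmod, PySem.Dict.items_insert_of_contains grpd _ hc]
        intro p hp
        obtain ⟨q, hq, hqe⟩ := List.mem_map.1 hp
        by_cases hq1 : (q.1 == pvKey c) = true
        · rw [if_pos hq1] at hqe; simp [← hqe]
        · rw [if_neg hq1] at hqe; exact hqe ▸ hne q hq
      unfold pvRel
      refine ⟨?_, by rw [hkeys]; exact hnd, hne'⟩
      rw [hmod, PySem.Dict.items_insert_of_contains grpd _ hc]
      unfold pvStepA
      rw [if_neg hk, if_neg (by simp [hcs] : ¬ seen.contains (pvKey c) = false)]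
      by_cases hcmp : pvDefLen (seen.getD (pvKey c) []) < pvDefLen c
      · -- A replaces; B's new group reduces to c
        have hb : pvBest (g ++ [c]) = c := by
          rw [pvBest_append_singleton]
          rw [hex] at hcmp
          simp [hcmp]
        rw [if_pos hcmp, PySem.Dict.items_insert_of_contains seen c hcs, hitems,
          List.map_map, List.map_map]
        apply List.map_congr_left
        intro p _
        by_cases hp1 : p.1 = pvKey c
        · simp [hp1, hb]
        · simp [hp1]
      · -- A keeps; B's new group reduces to the old best
        rw [if_neg hcmp, hitems, List.map_map]
        apply (List.map_congr_left _).symm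
        intro p hp
        by_cases hp1 : p.1 = pvKey c
        · have hb : pvBest (g ++ [c]) = pvBest g := by
            rw [pvBest_append_singleton]
            rw [hex] at hcmp
            simp [hcmp, hgne]
          simp [hp1, hb, hval p hp hp1]
        · simp [hp1]
    · -- fresh key: both append a new entry
      have hc' : grpd.contains (pvKey c) = false := by simpa using hc
      have hcs : seen.contains (pvKey c) = false := by
        rw [pvRel_contains ⟨hitems, hnd, hne⟩]; exact hc'
      have hmod : pvStepB grpd c = grpd.insert (pvKey c) [c] := by
        unfold pvStepB
        rw [if_neg hk]
        simp [PySem.Dict.modify, PySem.Dict.getD_of_not_contains grpd [] hc']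
      refine ⟨?_, ?_, ?_⟩
      · rw [hmod, PySem.Dict.items_insert_of_not_contains grpd _ hc']
        unfold pvStepA
        rw [if_neg hk, if_pos hcs, PySem.Dict.items_insert_of_not_contains seen c hcs, hitems]
        simp [pvBest, PySem.List.max?]
      · rw [hmod, PySem.Dict.keys_insert_of_not_contains grpd _ hc']
        simp only [List.nodup_append, hnd, List.nodup_cons]
        refine ⟨by simp, by simp, ?_⟩
        intro a ha b hb
        simp only [List.mem_singleton] at hb
        subst hb
        intro hab
        subst hab
        exact absurd ((PySem.Dict.contains_iff_mem_keys grpd _).2 ha) (by simp [hc'])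
      · rw [hmod, PySem.Dict.items_insert_of_not_contains grpd _ hc']
        intro p hp
        rcases List.mem_append.1 hp with hp | hp
        · exact hne p hp
        · simp only [List.mem_singleton] at hp
          simp [hp]

lemma pvRel_fold (l : List (List (String × String))) (seen : PySem.Dict String (List (String × String)))
    (grpd : PySem.Dict String (List (List (String × String)))) (h : pvRel seen grpd) :
    pvRel (l.foldl pvStepA seen) (l.foldl pvStepB grpd) := by
  induction l generalizing seen grpd with
  | nil => exact h
  | cons c t ih =>
    simp only [List.foldl_cons]
    exact ih _ _ (pvRel_step h c)


-- ===== VERDICT (by name: the statement is the Claim_ definition above) =====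
theorem deduplicate_concepts_py_spec : Claim_equal_deduplicate_concepts_py := by
  intro concepts _
  unfold Spec_deduplicate_concepts_py
  have ha : deduplicate_concepts_py concepts =
      (PySem.Dict.values (concepts.foldl pvStepA PySem.Dict.empty)).take 30 := rfl
  have hb : deduplicate_concepts_py_alt concepts =
      ((PySem.Dict.values (concepts.foldl pvStepB PySem.Dict.empty)).map pvBest).take 30 := rfl
  rw [ha, hb]
  have h := pvRel_fold concepts PySem.Dict.empty PySem.Dict.empty
    (by refine ⟨rfl, ?_, ?_⟩ <;> simp [PySem.Dict.empty, PySem.Dict.keys])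
  rw [PySem.Dict.values, PySem.Dict.values, h.1, List.map_map, List.map_map]
  simp [Function.comp_def]
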